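-- pv_equiv track=rewrite | github.com/jamesben6688/coding | greedy/jump_score.py | greedy_best_jump
-- ===== SOURCE A (Python) =====
-- def greedy_best_jump(arr):
--     n = len(arr)
--     score = 0
--     path = [0]
--     i = 0
--     while i < n - 1:
--         best_score = float('-inf')
--         best_j = -1
--         for j in range(i + 1, n):
--             gain = arr[j] * (j - i)
--             if gain > best_score:
--                 best_score = gain
--                 best_j = j
--         score += best_score
--         path.append(best_j)
--         i = best_j
--     return score, path
-- ===== SOURCE B (Python) =====
-- # Alternative strategy: a persistent Li Chao tree over queries x = 0..n-2
-- # precomputes the greedy target for every position (lines are inserted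
-- # right-to-left so only j > i compete at query x = i; ties are broken toward
-- # the smaller j, like A's scan), then the path is walked once.
--
-- def _beats(l1, l2, x):
--     # strictly better at x: larger value, or equal value and smaller index
--     v1 = l1[0] * x + l1[1]
--     v2 = l2[0] * x + l2[1]
--     return v1 > v2 or (v1 == v2 and l1[2] < l2[2])
--
--
-- def _pick(best, c, x):
--     if best is None or _beats(c, best, x):
--         return c
--     return best
--
--
-- def _insert(t, lo, hi, line):
--     if t is None:
--         return (line, None, None)
--     cur, lft, rgt = t
--     m = (lo + hi) // 2
--     if _beats(line, cur, m):
--         cur, line = line, cur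
--     if lo == hi:
--         return (cur, lft, rgt)
--     if _beats(line, cur, lo):
--         return (cur, _insert(lft, lo, m, line), rgt)
--     if _beats(line, cur, hi):
--         return (cur, lft, _insert(rgt, m + 1, hi, line))
--     return (cur, lft, rgt)
--
--
-- def _query(t, lo, hi, x, best):
--     if t is None:
--         return best
--     cur, lft, rgt = t
--     best = _pick(best, cur, x)
--     if lo == hi:
--         return best
--     m = (lo + hi) // 2
--     if x <= m:
--         return _query(lft, lo, m, x, best)
--     return _query(rgt, m + 1, hi, x, best)
--
--
-- def greedy_best_jump(arr):
--     n = len(arr)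
--     if n <= 1:
--         return 0, [0]
--     hi = n - 2
--     t = None
--     best = [0] * (n - 1)
--     for i in range(n - 2, -1, -1):
--         j = i + 1
--         a = arr[j]
--         t = _insert(t, 0, hi, (-a, a * j, j))
--         best[i] = _query(t, 0, hi, i, None)[2]
--     score = 0
--     path = [0]
--     i = 0
--     while i < n - 1:
--         j = best[i]
--         score += arr[j] * (j - i)
--         path.append(j)
--         i = j
--     return score, path
-- ===== Notes on version B (the rewrite author's own statement) =====
-- stated objective: alternative
-- what changed: A rescans all of arr[i+1:] at every greedy step; B precomputes every step's target in one right-to-left sweep with a persistent Li Chao tree over the lines x -> arr[j]*(j-x) (ties broken toward the smaller j, matching A's first-maximum scan) and then walks the path once.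
import Mathlib
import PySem

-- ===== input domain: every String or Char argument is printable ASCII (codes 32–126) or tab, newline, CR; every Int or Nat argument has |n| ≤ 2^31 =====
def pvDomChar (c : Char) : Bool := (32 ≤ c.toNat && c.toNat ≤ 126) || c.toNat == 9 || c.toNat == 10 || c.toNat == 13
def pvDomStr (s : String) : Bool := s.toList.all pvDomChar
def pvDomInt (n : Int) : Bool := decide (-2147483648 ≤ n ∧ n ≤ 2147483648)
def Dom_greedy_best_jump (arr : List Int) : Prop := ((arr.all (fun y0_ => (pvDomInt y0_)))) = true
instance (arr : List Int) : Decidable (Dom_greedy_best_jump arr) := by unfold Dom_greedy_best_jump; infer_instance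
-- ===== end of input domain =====

-- B replaces A's per-step rescan of arr[i+1:] by a persistent Li Chao tree built
-- right-to-left that precomputes every step's target, then walks the path once.

-- ===== PORT A =====
-- inner 'for j in range(i+1, n)' loop; best_score starts as float('-inf'), modelled as none
-- (it is replaced on the first iteration, before any arithmetic touches it).
def gbjInner (arr : List Int) (i : Int) : Option Int × Int :=
  (PySem.List.pyRange (i + 1) arr.length 1).foldl
    (fun st j =>
      let gain := (PySem.List.pyGet? arr j).getD 0 * (j - i)  -- j is always in range here
      match st.1 with
      | none => (some gain, j)
      | some b => if gain > b then (some gain, j) else st)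
    (none, -1)

-- the outer 'while i < n - 1' loop; fuel n+1 is enough since i strictly increases
def gbjLoopA (arr : List Int) : Nat → Int → Int → List Int → Int × List Int
  | 0, _, score, path => (score, path)
  | fuel + 1, i, score, path =>
    if i < (arr.length : Int) - 1 then
      let r := gbjInner arr i
      gbjLoopA arr fuel r.2 (score + r.1.getD 0) (path ++ [r.2])
    else (score, path)

def greedy_best_jump (arr : List Int) : Int × List Int :=
  gbjLoopA arr (arr.length + 1) 0 0 [0]

-- ===== PORT B =====
-- a line is (slope, intercept, j); _beats: strictly better at x (larger value, smaller j on ties)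
def lcBeats (l1 l2 : Int × Int × Int) (x : Int) : Bool :=
  let v1 := l1.1 * x + l1.2.1
  let v2 := l2.1 * x + l2.2.1
  v1 > v2 || (v1 == v2 && decide (l1.2.2 < l2.2.2))

def lcPick (best : Option (Int × Int × Int)) (c : Int × Int × Int) (x : Int) :
    Option (Int × Int × Int) :=
  match best with
  | none => some c
  | some b => if lcBeats c b x then some c else some b

-- persistent Li Chao tree (None = leaf in Source B)
inductive LCT
  | leaf
  | node : (Int × Int × Int) → LCT → LCT → LCT
deriving DecidableEq, Repr

def lcInsert : LCT → Int → Int → (Int × Int × Int) → LCT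
  | .leaf, _, _, line => .node line .leaf .leaf
  | .node cur l r, lo, hi, line =>
    let m := PySem.Int.floordiv (lo + hi) 2
    let p := if lcBeats line cur m then (line, cur) else (cur, line)  -- (winner, loser)
    if lo == hi then .node p.1 l r
    else if lcBeats p.2 p.1 lo then .node p.1 (lcInsert l lo m p.2) r
    else if lcBeats p.2 p.1 hi then .node p.1 l (lcInsert r (m + 1) hi p.2)
    else .node p.1 l r

def lcQuery : LCT → Int → Int → Int → Option (Int × Int × Int) → Option (Int × Int × Int)
  | .leaf, _, _, _, best => best
  | .node cur l r, lo, hi, x, best =>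
    let best' := lcPick best cur x
    if lo == hi then best'
    else
      let m := PySem.Int.floordiv (lo + hi) 2
      if x ≤ m then lcQuery l lo m x best'
      else lcQuery r (m + 1) hi x best'

-- the 'for i in range(n-2, -1, -1)' sweep; Source B writes best[i] in descending order of i,
-- which is the same list as this cons-accumulation.
-- loop body of the 'for i in range(n-2, -1, -1)' sweep
def gbjSweepStep (arr : List Int) (st : LCT × List Int) (i : Int) : LCT × List Int :=
  let j := i + 1
  let a := (PySem.List.pyGet? arr j).getD 0  -- j is always in range here
  let t := lcInsert st.1 0 ((arr.length : Int) - 2) (-a, a * j, j)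
  (t, (((lcQuery t 0 ((arr.length : Int) - 2) i none).getD (0, 0, 0)).2.2) :: st.2)

def gbjSweep (arr : List Int) : List Int :=
  (((PySem.List.pyRange ((arr.length : Int) - 2) (-1) (-1)).foldl
    (gbjSweepStep arr) (LCT.leaf, [])).2)

-- the final 'while i < n - 1' walk
def gbjWalk (arr best : List Int) : Nat → Int → Int → List Int → Int × List Int
  | 0, _, score, path => (score, path)
  | fuel + 1, i, score, path =>
    if i < (arr.length : Int) - 1 then
      let j := (PySem.List.pyGet? best i).getD 0  -- i is always in range here
      gbjWalk arr best fuel j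
        (score + (PySem.List.pyGet? arr j).getD 0 * (j - i)) (path ++ [j])
    else (score, path)

def greedy_best_jump_alt (arr : List Int) : Int × List Int :=
  if arr.length ≤ 1 then (0, [0])
  else gbjWalk arr (gbjSweep arr) (arr.length + 1) 0 0 [0]

-- ===== PRECONDITION & SPEC =====
def Spec_greedy_best_jump (arr : List Int) (out : Int × List Int) : Prop := out = greedy_best_jump_alt arr
instance (arr : List Int) (out : Int × List Int) : Decidable (Spec_greedy_best_jump arr out) := by unfold Spec_greedy_best_jump; infer_instance

-- ===== CLAIM (what is proved, stated in full; the proofs are below) =====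
def Claim_equal_greedy_best_jump : Prop := ∀ (arr : List Int), Dom_greedy_best_jump arr → Spec_greedy_best_jump arr (greedy_best_jump arr)

-- ===== LEMMAS AND PROOFS =====

-- affine-function facts behind Li Chao correctness
lemma convex_aux {z1 z2 w1 w2 a b c : Int} (hab : a ≤ b) (hbc : b ≤ c)
    (ha : w1*a+w2 ≤ z1*a+z2) (hc : w1*c+w2 ≤ z1*c+z2) : w1*b+w2 ≤ z1*b+z2 := by
  have key : (c-a)*(z1*b+z2 - (w1*b+w2))
      = (b-a)*(z1*c+z2-(w1*c+w2)) + (c-b)*(z1*a+z2-(w1*a+w2)) := by ring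
  rcases eq_or_lt_of_le (hab.trans hbc) with rfl | hac
  · have : b = a := le_antisymm hbc hab
    subst this; exact ha
  · have h1 : 0 ≤ (b-a)*(z1*c+z2-(w1*c+w2)) := mul_nonneg (by omega) (by omega)
    have h2 : 0 ≤ (c-b)*(z1*a+z2-(w1*a+w2)) := mul_nonneg (by omega) (by omega)
    have h3 : 0 ≤ (c-a)*(z1*b+z2 - (w1*b+w2)) := by omega
    nlinarith [h3, hac]

lemma convex_aux_strict {z1 z2 w1 w2 a b c : Int} (hab : a ≤ b) (hbc : b ≤ c)
    (ha : w1*a+w2 < z1*a+z2) (hc : w1*c+w2 < z1*c+z2) : w1*b+w2 < z1*b+z2 := by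
  have key : (c-a)*(z1*b+z2 - (w1*b+w2))
      = (b-a)*(z1*c+z2-(w1*c+w2)) + (c-b)*(z1*a+z2-(w1*a+w2)) := by ring
  rcases eq_or_lt_of_le (hab.trans hbc) with rfl | hac
  · have : b = a := le_antisymm hbc hab
    subst this; exact ha
  · have h2 : 0 ≤ (c-b)*(z1*a+z2-(w1*a+w2)) := mul_nonneg (by omega) (by omega)
    rcases eq_or_lt_of_le hab with rfl | hab'
    · exact ha
    · have h1' : 0 < (b-a)*(z1*c+z2-(w1*c+w2)) := mul_pos (by omega) (by omega)
      have h3 : 0 < (c-a)*(z1*b+z2 - (w1*b+w2)) := by omega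
      nlinarith [h3, hac]

lemma shift_aux {z1 z2 w1 w2 x y : Int} (hxy : x ≤ y) (hp : 0 ≤ z1 - w1) :
    (z1*x+z2) - (w1*x+w2) ≤ (z1*y+z2) - (w1*y+w2) := by
  nlinarith [mul_nonneg hp (sub_nonneg.2 hxy)]

lemma shift_aux_neg {z1 z2 w1 w2 x y : Int} (hxy : x ≤ y) (hp : z1 - w1 ≤ 0) :
    (z1*y+z2) - (w1*y+w2) ≤ (z1*x+z2) - (w1*x+w2) := by
  nlinarith [mul_nonneg (neg_nonneg.2 hp) (sub_nonneg.2 hxy)]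

-- the line of index j, and "l1 at least as good as l2 at x"
def lineOf (arr : List Int) (j : Int) : Int × Int × Int :=
  (-(PySem.List.pyGet? arr j).getD 0, (PySem.List.pyGet? arr j).getD 0 * j, j)

def Ble (l1 l2 : Int × Int × Int) (x : Int) : Prop := lcBeats l2 l1 x = false

lemma lcBeats_iff (l1 l2 : Int × Int × Int) (x : Int) :
    lcBeats l1 l2 x = true ↔
      (l1.1 * x + l1.2.1 > l2.1 * x + l2.2.1 ∨
       (l1.1 * x + l1.2.1 = l2.1 * x + l2.2.1 ∧ l1.2.2 < l2.2.2)) := by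
  simp [lcBeats]

lemma Ble_iff (l1 l2 : Int × Int × Int) (x : Int) :
    Ble l1 l2 x ↔
      (l1.1 * x + l1.2.1 > l2.1 * x + l2.2.1 ∨
       (l1.1 * x + l1.2.1 = l2.1 * x + l2.2.1 ∧ l1.2.2 ≤ l2.2.2)) := by
  simp [Ble, lcBeats]; omega

lemma Ble_refl (l : Int × Int × Int) (x : Int) : Ble l l x := by
  simp [Ble_iff]

lemma Ble_trans {l1 l2 l3 : Int × Int × Int} {x : Int}
    (h1 : Ble l1 l2 x) (h2 : Ble l2 l3 x) : Ble l1 l3 x := by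
  rw [Ble_iff] at *; rcases h1 with h1 | h1 <;> rcases h2 with h2 | h2 <;> omega

lemma beats_asymm {l1 l2 : Int × Int × Int} {x : Int} (h : lcBeats l1 l2 x = true) :
    lcBeats l2 l1 x = false := by
  rw [lcBeats_iff] at h
  rw [← Bool.not_eq_true, lcBeats_iff]
  omega

lemma beats_Ble {l1 l2 : Int × Int × Int} {x : Int} (h : lcBeats l1 l2 x = true) :
    Ble l1 l2 x := by
  rw [lcBeats_iff] at h; rw [Ble_iff]; omega

lemma not_beats_Ble {l1 l2 : Int × Int × Int} {x : Int} (h : ¬ lcBeats l1 l2 x = true) :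
    Ble l2 l1 x := by
  simp at h; simp [Ble, h]

-- convexity: the set where z beats w is an interval
lemma beats_convex {z w : Int × Int × Int} {a b c : Int}
    (ha : lcBeats z w a = true) (hc : lcBeats z w c = true) (hab : a ≤ b) (hbc : b ≤ c) :
    lcBeats z w b = true := by
  rw [lcBeats_iff] at ha hc ⊢
  by_cases hid : z.2.2 < w.2.2
  · have ha' : w.1*a+w.2.1 ≤ z.1*a+z.2.1 := by omega
    have hc' : w.1*c+w.2.1 ≤ z.1*c+z.2.1 := by omega
    have hb' := convex_aux hab hbc ha' hc'
    rcases lt_or_eq_of_le hb' with h | h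
    · exact Or.inl h
    · exact Or.inr ⟨h.symm, hid⟩
  · have ha' : w.1*a+w.2.1 < z.1*a+z.2.1 := by omega
    have hc' : w.1*c+w.2.1 < z.1*c+z.2.1 := by omega
    exact Or.inl (convex_aux_strict hab hbc ha' hc')

-- the region where z beats w is a ray: if it contains an interior point it contains an end
lemma beats_ray {z w : Int × Int × Int} {lo x hi : Int} (h1 : lo ≤ x) (h2 : x ≤ hi)
    (hb : lcBeats z w x = true) : lcBeats z w lo = true ∨ lcBeats z w hi = true := by
  rw [lcBeats_iff] at hb ⊢
  rw [lcBeats_iff (x := hi)]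
  rcases le_or_gt 0 (z.1 - w.1) with hp | hp
  · right
    have := shift_aux h2 hp (z2 := z.2.1) (w2 := w.2.1)
    omega
  · left
    have := shift_aux_neg h1 (le_of_lt hp) (z2 := z.2.1) (w2 := w.2.1)
    omega

-- path of x through the tree; lcQuery is the fold of lcPick along it
def lcPath : LCT → Int → Int → Int → List (Int × Int × Int)
  | .leaf, _, _, _ => []
  | .node cur l r, lo, hi, x =>
    if lo == hi then [cur]
    else
      let m := PySem.Int.floordiv (lo + hi) 2
      cur :: (if x ≤ m then lcPath l lo m x else lcPath r (m + 1) hi x)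

def lcLines : LCT → List (Int × Int × Int)
  | .leaf => []
  | .node cur l r => cur :: (lcLines l ++ lcLines r)

lemma lcQuery_eq_fold (t : LCT) (lo hi x : Int) (best : Option (Int × Int × Int)) :
    lcQuery t lo hi x best = (lcPath t lo hi x).foldl (fun b c => lcPick b c x) best := by
  induction t generalizing lo hi best with
  | leaf => simp [lcQuery, lcPath]
  | node cur l r ihl ihr =>
    simp only [lcQuery, lcPath]
    split_ifs with h1 h2 <;> simp [List.foldl_cons, ihl, ihr]

lemma lcPath_subset_lines (t : LCT) (lo hi x : Int) : lcPath t lo hi x ⊆ lcLines t := by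
  induction t generalizing lo hi with
  | leaf => simp [lcPath, lcLines]
  | node cur l r ihl ihr =>
    intro y hy
    simp only [lcPath] at hy
    simp only [lcLines, List.mem_cons, List.mem_append]
    split_ifs at hy with h1 h2
    · simp at hy; exact Or.inl hy
    · rcases List.mem_cons.1 hy with rfl | hy
      · exact Or.inl rfl
      · exact Or.inr (Or.inl (ihl lo _ hy))
    · rcases List.mem_cons.1 hy with rfl | hy
      · exact Or.inl rfl
      · exact Or.inr (Or.inr (ihr _ hi hy))

lemma lcLines_insert (t : LCT) (lo hi : Int) (line : Int × Int × Int) :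
    lcLines (lcInsert t lo hi line) ⊆ line :: lcLines t := by
  induction t generalizing lo hi line with
  | leaf => simp [lcInsert, lcLines]
  | node cur l r ihl ihr =>
    intro y hy
    simp only [lcInsert] at hy
    simp only [lcLines, List.mem_cons, List.mem_append]
    by_cases hb : lcBeats line cur (PySem.Int.floordiv (lo + hi) 2) = true
    · rw [if_pos hb] at hy
      split_ifs at hy with h1 h2 h3 <;>
        simp only [lcLines, List.mem_cons, List.mem_append] at hy
      · tauto
      · rcases hy with rfl | hy
        · tauto
        · rcases hy with hy | hy
          · rcases List.mem_cons.1 (ihl _ _ _ hy) with rfl | h <;> tauto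
          · tauto
      · rcases hy with rfl | hy
        · tauto
        · rcases hy with hy | hy
          · tauto
          · rcases List.mem_cons.1 (ihr _ _ _ hy) with rfl | h <;> tauto
      · tauto
    · rw [if_neg hb] at hy
      split_ifs at hy with h1 h2 h3 <;>
        simp only [lcLines, List.mem_cons, List.mem_append] at hy
      · tauto
      · rcases hy with rfl | hy
        · tauto
        · rcases hy with hy | hy
          · rcases List.mem_cons.1 (ihl _ _ _ hy) with rfl | h <;> tauto
          · tauto
      · rcases hy with rfl | hy
        · tauto
        · rcases hy with hy | hy
          · tauto
          · rcases List.mem_cons.1 (ihr _ _ _ hy) with rfl | h <;> tauto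
      · tauto

def Covers (t : LCT) (lo hi : Int) (l : Int × Int × Int) : Prop :=
  ∀ x, lo ≤ x → x ≤ hi → ∃ c ∈ lcPath t lo hi x, Ble c l x

lemma mid_bounds {lo hi : Int} (h : lo ≤ hi) :
    lo ≤ PySem.Int.floordiv (lo + hi) 2 ∧ PySem.Int.floordiv (lo + hi) 2 ≤ hi :=
  PySem.Int.floordiv_two_mid_bounds h

lemma mid_lt {lo hi : Int} (h : lo < hi) : PySem.Int.floordiv (lo + hi) 2 < hi := by
  rw [PySem.Int.floordiv_lt_iff_lt_mul (by norm_num)]; omega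

lemma mid_self (lo : Int) : PySem.Int.floordiv (lo + lo) 2 = lo := by
  rw [PySem.Int.floordiv_eq_iff_of_pos (by norm_num)]; omega

lemma covers_insert_self (t : LCT) (lo hi : Int) (line : Int × Int × Int) (h : lo ≤ hi) :
    Covers (lcInsert t lo hi line) lo hi line := by
  induction t generalizing lo hi line with
  | leaf =>
    intro x hx1 hx2
    refine ⟨line, ?_, Ble_refl _ _⟩
    simp only [lcInsert, lcPath]
    split_ifs <;> simp
  | node cur l r ihl ihr =>
    intro x hx1 hx2
    simp only [lcInsert]
    by_cases hb : lcBeats line cur (PySem.Int.floordiv (lo + hi) 2) = true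
    · rw [if_pos hb]
      split_ifs with h1 h2 h3 <;>
        (refine ⟨line, ?_, Ble_refl _ _⟩; simp only [lcPath]; split_ifs <;> simp)
    · rw [if_neg hb]
      have hcl : Ble cur line (PySem.Int.floordiv (lo + hi) 2) := not_beats_Ble hb
      split_ifs with h1 h2 h3
      · -- lo = hi
        have hlo : lo = hi := by simpa using h1
        have hmx : PySem.Int.floordiv (lo + hi) 2 = x := by
          rw [← hlo, mid_self]; omega
        refine ⟨cur, ?_, ?_⟩
        · simp only [lcPath]; rw [if_pos h1]; simp
        · rw [← hmx]; exact hcl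
      · -- loser (= line) inserted on the left
        have hlh : lo < hi := by
          rcases lt_or_eq_of_le h with h' | h'; exact h'; simp [h'] at h1
        have hmh := mid_bounds h
        rcases le_or_gt x (PySem.Int.floordiv (lo + hi) 2) with hxm | hxm
        · obtain ⟨c, hc1, hc2⟩ := ihl lo _ line hmh.1 x hx1 hxm
          refine ⟨c, ?_, hc2⟩
          simp only [lcPath]; rw [if_neg h1, if_pos hxm]
          exact List.mem_cons_of_mem _ hc1
        · refine ⟨cur, ?_, ?_⟩
          · simp only [lcPath]; rw [if_neg h1, if_neg (by omega)]; simp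
          · refine not_beats_Ble fun hbx => ?_
            exact hb (beats_convex h2 hbx hmh.1 (by omega))
      · -- loser (= line) inserted on the right
        have hlh : lo < hi := by
          rcases lt_or_eq_of_le h with h' | h'; exact h'; simp [h'] at h1
        have hmh := mid_bounds h
        have hml := mid_lt hlh
        rcases le_or_gt x (PySem.Int.floordiv (lo + hi) 2) with hxm | hxm
        · refine ⟨cur, ?_, ?_⟩
          · simp only [lcPath]; rw [if_neg h1, if_pos hxm]; simp
          · refine not_beats_Ble fun hbx => ?_
            exact hb (beats_convex hbx h3 hxm hmh.2)
        · obtain ⟨c, hc1, hc2⟩ := ihr (PySem.Int.floordiv (lo + hi) 2 + 1) hi line (by omega) x (by omega) hx2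
          refine ⟨c, ?_, hc2⟩
          simp only [lcPath]; rw [if_neg h1, if_neg (by omega)]
          exact List.mem_cons_of_mem _ hc1
      · -- loser (= line) discarded: it never beats cur on [lo, hi]
        refine ⟨cur, ?_, ?_⟩
        · simp only [lcPath]; split_ifs <;> simp
        · refine not_beats_Ble fun hbx => ?_
          rcases beats_ray hx1 hx2 hbx with hlo' | hhi'
          · exact h2 hlo'
          · exact h3 hhi'

lemma covers_insert_point (t : LCT) (lo hi x : Int) (line l0 : Int × Int × Int)
    (h : lo ≤ hi) (hx1 : lo ≤ x) (hx2 : x ≤ hi)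
    (hc : ∃ c ∈ lcPath t lo hi x, Ble c l0 x) :
    ∃ c ∈ lcPath (lcInsert t lo hi line) lo hi x, Ble c l0 x := by
  induction t generalizing lo hi line with
  | leaf =>
    obtain ⟨c, hc1, _⟩ := hc
    simp [lcPath] at hc1
  | node cur l r ihl ihr =>
    obtain ⟨c, hc1, hc2⟩ := hc
    simp only [lcInsert]
    simp only [lcPath] at hc1
    by_cases h1 : (lo == hi) = true
    · -- singleton interval: old path is [cur]
      rw [if_pos h1] at hc1
      simp at hc1
      subst hc1
      have hlo : lo = hi := by simpa using h1
      have hmx : PySem.Int.floordiv (lo + hi) 2 = x := by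
        rw [← hlo, mid_self]; omega
      by_cases hb : lcBeats line c (PySem.Int.floordiv (lo + hi) 2) = true
      · rw [if_pos hb, if_pos h1]
        refine ⟨line, ?_, Ble_trans (beats_Ble (by rwa [hmx] at hb)) hc2⟩
        simp only [lcPath]; rw [if_pos h1]; simp
      · rw [if_neg hb, if_pos h1]
        refine ⟨c, ?_, hc2⟩
        simp only [lcPath]; rw [if_pos h1]; simp
    · rw [if_neg h1] at hc1
      have hlh : lo < hi := by
        rcases lt_or_eq_of_le h with h' | h'; exact h'; simp [h'] at h1
      have hmh := mid_bounds h
      have hml := mid_lt hlh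
      by_cases hb : lcBeats line cur (PySem.Int.floordiv (lo + hi) 2) = true
      · -- line wins at m; cur is the loser
        rw [if_pos hb, if_neg h1]
        rcases List.mem_cons.1 hc1 with rfl | hcin
        · -- the old witness is the displaced root cur (here named c)
          have hasym : ¬ lcBeats c line (PySem.Int.floordiv (lo + hi) 2) = true := by
            simpa using beats_asymm hb
          split_ifs with h2 h3
          · -- cur inserted left
            rcases le_or_gt x (PySem.Int.floordiv (lo + hi) 2) with hxm | hxm
            · obtain ⟨c', hc1', hc2'⟩ := covers_insert_self l lo _ c hmh.1 x hx1 hxm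
              refine ⟨c', ?_, Ble_trans hc2' hc2⟩
              simp only [lcPath]; rw [if_neg h1, if_pos hxm]
              exact List.mem_cons_of_mem _ hc1'
            · refine ⟨line, ?_, Ble_trans ?_ hc2⟩
              · simp only [lcPath]; rw [if_neg h1, if_neg (by omega)]; simp
              · refine not_beats_Ble fun hbx => ?_
                exact hasym (beats_convex h2 hbx hmh.1 (by omega))
          · -- cur inserted right
            rcases le_or_gt x (PySem.Int.floordiv (lo + hi) 2) with hxm | hxm
            · refine ⟨line, ?_, Ble_trans ?_ hc2⟩
              · simp only [lcPath]; rw [if_neg h1, if_pos hxm]; simp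
              · refine not_beats_Ble fun hbx => ?_
                exact hasym (beats_convex hbx h3 hxm hmh.2)
            · obtain ⟨c', hc1', hc2'⟩ :=
                covers_insert_self r (PySem.Int.floordiv (lo + hi) 2 + 1) hi c (by omega) x
                  (by omega) hx2
              refine ⟨c', ?_, Ble_trans hc2' hc2⟩
              simp only [lcPath]; rw [if_neg h1, if_neg (by omega)]
              exact List.mem_cons_of_mem _ hc1'
          · -- cur discarded
            refine ⟨line, ?_, Ble_trans ?_ hc2⟩
            · simp only [lcPath]; split_ifs <;> simp
            · refine not_beats_Ble fun hbx => ?_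
              rcases beats_ray hx1 hx2 hbx with hlo' | hhi'
              · exact h2 hlo'
              · exact h3 hhi'
        · -- the old witness sits in a child
          split_ifs with h2 h3
          · -- cur inserted left
            rcases le_or_gt x (PySem.Int.floordiv (lo + hi) 2) with hxm | hxm
            · rw [if_pos hxm] at hcin
              obtain ⟨c', hc1', hc2'⟩ := ihl lo _ cur hmh.1 hx1 hxm ⟨c, hcin, hc2⟩
              refine ⟨c', ?_, hc2'⟩
              simp only [lcPath]; rw [if_neg h1, if_pos hxm]
              exact List.mem_cons_of_mem _ hc1'
            · rw [if_neg (by omega)] at hcin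
              refine ⟨c, ?_, hc2⟩
              simp only [lcPath]; rw [if_neg h1, if_neg (by omega)]
              exact List.mem_cons_of_mem _ hcin
          · -- cur inserted right
            rcases le_or_gt x (PySem.Int.floordiv (lo + hi) 2) with hxm | hxm
            · rw [if_pos hxm] at hcin
              refine ⟨c, ?_, hc2⟩
              simp only [lcPath]; rw [if_neg h1, if_pos hxm]
              exact List.mem_cons_of_mem _ hcin
            · rw [if_neg (by omega)] at hcin
              obtain ⟨c', hc1', hc2'⟩ :=
                ihr (PySem.Int.floordiv (lo + hi) 2 + 1) hi cur (by omega) (by omega) hx2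
                  ⟨c, hcin, hc2⟩
              refine ⟨c', ?_, hc2'⟩
              simp only [lcPath]; rw [if_neg h1, if_neg (by omega)]
              exact List.mem_cons_of_mem _ hc1'
          · -- cur discarded: children unchanged
            refine ⟨c, ?_, hc2⟩
            simp only [lcPath]; rw [if_neg h1]
            exact List.mem_cons_of_mem _ hcin
      · -- cur stays the root; line is the loser
        rw [if_neg hb, if_neg h1]
        rcases List.mem_cons.1 hc1 with rfl | hcin
        · -- witness is the root, which is kept everywhere
          split_ifs with h2 h3 <;>
            (refine ⟨c, ?_, hc2⟩; simp only [lcPath]; split_ifs <;> simp)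
        · split_ifs with h2 h3
          · -- line inserted left
            rcases le_or_gt x (PySem.Int.floordiv (lo + hi) 2) with hxm | hxm
            · rw [if_pos hxm] at hcin
              obtain ⟨c', hc1', hc2'⟩ := ihl lo _ line hmh.1 hx1 hxm ⟨c, hcin, hc2⟩
              refine ⟨c', ?_, hc2'⟩
              simp only [lcPath]; rw [if_neg h1, if_pos hxm]
              exact List.mem_cons_of_mem _ hc1'
            · rw [if_neg (by omega)] at hcin
              refine ⟨c, ?_, hc2⟩
              simp only [lcPath]; rw [if_neg h1, if_neg (by omega)]
              exact List.mem_cons_of_mem _ hcin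
          · -- line inserted right
            rcases le_or_gt x (PySem.Int.floordiv (lo + hi) 2) with hxm | hxm
            · rw [if_pos hxm] at hcin
              refine ⟨c, ?_, hc2⟩
              simp only [lcPath]; rw [if_neg h1, if_pos hxm]
              exact List.mem_cons_of_mem _ hcin
            · rw [if_neg (by omega)] at hcin
              obtain ⟨c', hc1', hc2'⟩ :=
                ihr (PySem.Int.floordiv (lo + hi) 2 + 1) hi line (by omega) (by omega) hx2
                  ⟨c, hcin, hc2⟩
              refine ⟨c', ?_, hc2'⟩
              simp only [lcPath]; rw [if_neg h1, if_neg (by omega)]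
              exact List.mem_cons_of_mem _ hc1'
          · -- line discarded: children unchanged
            refine ⟨c, ?_, hc2⟩
            simp only [lcPath]; rw [if_neg h1]
            exact List.mem_cons_of_mem _ hcin

-- A's inner-loop specification: the first index attaining the maximal gain
def TopIdx (arr : List Int) (i j : Int) : Prop :=
  i + 1 ≤ j ∧ j < (arr.length : Int) ∧
    ∀ k, i + 1 ≤ k → k < (arr.length : Int) → Ble (lineOf arr j) (lineOf arr k) i

lemma TopIdx_unique {arr : List Int} {i j j' : Int} (h : TopIdx arr i j) (h' : TopIdx arr i j') :
    j = j' := by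
  obtain ⟨h1, h2, h3⟩ := h; obtain ⟨h1', h2', h3'⟩ := h'
  have a := h3 j' h1' h2'; have b := h3' j h1 h2
  rw [Ble_iff] at a b; simp [lineOf] at a b; omega

def gainOf (arr : List Int) (i j : Int) : Int := (PySem.List.pyGet? arr j).getD 0 * (j - i)

lemma lineOf_val (arr : List Int) (i j : Int) :
    (lineOf arr j).1 * i + (lineOf arr j).2.1 = gainOf arr i j := by
  simp [lineOf, gainOf]; ring

lemma Ble_lineOf (arr : List Int) (i j k : Int) :
    Ble (lineOf arr j) (lineOf arr k) i ↔
      (gainOf arr i j > gainOf arr i k ∨ (gainOf arr i j = gainOf arr i k ∧ j ≤ k)) := by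
  rw [Ble_iff, lineOf_val, lineOf_val]
  simp [lineOf]

lemma inner_inv (arr : List Int) (i : Int) (d : Nat) :
    ∃ b : Int,
      ((PySem.List.pyRange (i + 1) (i + 2 + (d : Int)) 1).foldl
        (fun st j =>
          let gain := (PySem.List.pyGet? arr j).getD 0 * (j - i)
          match st.1 with
          | none => (some gain, j)
          | some v => if gain > v then (some gain, j) else st)
        ((none, -1) : Option Int × Int))
        = (some (gainOf arr i b), b) ∧
      i + 1 ≤ b ∧ b < i + 2 + (d : Int) ∧
      ∀ k, i + 1 ≤ k → k < i + 2 + (d : Int) → Ble (lineOf arr b) (lineOf arr k) i := by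
  induction d with
  | zero =>
    refine ⟨i + 1, ?_, by omega, by omega, ?_⟩
    · have : i + 2 + ((0 : Nat) : Int) = (i + 1) + 1 := by push_cast; ring
      rw [this, PySem.List.pyRange_one_singleton]
      simp [gainOf]
    · intro k hk1 hk2
      have : k = i + 1 := by push_cast at hk2; omega
      subst this
      exact Ble_refl _ _
  | succ d ih =>
    obtain ⟨b, hfold, hb1, hb2, htop⟩ := ih
    have hsplit : PySem.List.pyRange (i + 1) (i + 2 + ((d + 1 : Nat) : Int)) 1
        = PySem.List.pyRange (i + 1) (i + 2 + (d : Int)) 1 ++ [i + 2 + (d : Int)] := by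
      have h1 : i + 2 + ((d + 1 : Nat) : Int) = (i + 2 + (d : Int)) + 1 := by push_cast; ring
      rw [h1, PySem.List.pyRange_one_succ_right (by omega)]
    rw [hsplit, List.foldl_append, hfold]
    set t := i + 2 + (d : Int) with ht
    by_cases hgt : gainOf arr i t > gainOf arr i b
    · refine ⟨t, ?_, by omega, by push_cast; omega, ?_⟩
      · simp only [List.foldl_cons, List.foldl_nil]
        show (if gainOf arr i t > gainOf arr i b then (some (gainOf arr i t), t)
              else (some (gainOf arr i b), b)) = _
        rw [if_pos hgt]
      · intro k hk1 hk2
        push_cast at hk2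
        rcases lt_or_eq_of_le (show k ≤ t by omega) with hk | rfl
        · exact Ble_trans ((Ble_lineOf arr i t b).2 (Or.inl hgt)) (htop k hk1 hk)
        · exact Ble_refl _ _
    · refine ⟨b, ?_, hb1, by push_cast; omega, ?_⟩
      · simp only [List.foldl_cons, List.foldl_nil]
        show (if gainOf arr i t > gainOf arr i b then (some (gainOf arr i t), t)
              else (some (gainOf arr i b), b)) = _
        rw [if_neg hgt]
      · intro k hk1 hk2
        push_cast at hk2
        rcases lt_or_eq_of_le (show k ≤ t by omega) with hk | rfl
        · exact htop k hk1 hk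
        · exact (Ble_lineOf arr i b t).2 (by omega)

lemma gbjInner_top (arr : List Int) (i : Int) (h1 : i < (arr.length : Int) - 1) :
    gbjInner arr i =
      (some ((PySem.List.pyGet? arr (gbjInner arr i).2).getD 0 * ((gbjInner arr i).2 - i)),
        (gbjInner arr i).2) ∧
    TopIdx arr i (gbjInner arr i).2 := by
  have hd : ∃ d : Nat, (arr.length : Int) = i + 2 + (d : Int) := by
    refine ⟨((arr.length : Int) - i - 2).toNat, ?_⟩
    have : (0:Int) ≤ (arr.length : Int) - i - 2 := by omega
    omega
  obtain ⟨d, hdl⟩ := hd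
  obtain ⟨b, hfold, hb1, hb2, htop⟩ := inner_inv arr i d
  have hinner : gbjInner arr i = (some (gainOf arr i b), b) := by
    unfold gbjInner
    rw [hdl]
    exact hfold
  rw [hinner]
  refine ⟨rfl, hb1, by omega, ?_⟩
  intro k hk1 hk2
  exact htop k hk1 (by omega)

-- the sweep produces, at index i, the top index for position i
lemma lcPick_none (c : Int × Int × Int) (x : Int) : lcPick none c x = some c := rfl

lemma lcPick_some (b c : Int × Int × Int) (x : Int) :
    lcPick (some b) c x = if lcBeats c b x then some c else some b := rfl

lemma foldPick_mem (path : List (Int × Int × Int)) (best : Option (Int × Int × Int)) (x : Int) :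
    ∀ r, path.foldl (fun b c => lcPick b c x) best = some r →
      (best = some r ∨ r ∈ path) := by
  induction path generalizing best with
  | nil => intro r h; simp at h; exact Or.inl (by rw [h])
  | cons c cs ih =>
    intro r h
    rw [List.foldl_cons] at h
    rcases ih (lcPick best c x) r h with h' | h'
    · rcases best with _ | b
      · rw [lcPick_none] at h'
        simp at h'; exact Or.inr (by simp [h'])
      · rw [lcPick_some] at h'
        split_ifs at h' with hb
        · simp at h'; exact Or.inr (by simp [h'])
        · simp at h'; exact Or.inl (by rw [h'])
    · exact Or.inr (List.mem_cons_of_mem _ h')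

lemma foldPick_ge_start (path : List (Int × Int × Int)) (b : Int × Int × Int) (x : Int)
    (r : Int × Int × Int) (hr : path.foldl (fun b c => lcPick b c x) (some b) = some r) :
    Ble r b x := by
  induction path generalizing b with
  | nil => simp at hr; rw [hr]; exact Ble_refl _ _
  | cons c cs ih =>
    rw [List.foldl_cons, lcPick_some] at hr
    split_ifs at hr with hb
    · exact Ble_trans (ih c hr) (beats_Ble hb)
    · exact ih b hr

lemma foldPick_ble (path : List (Int × Int × Int)) (best : Option (Int × Int × Int)) (x : Int)
    (r : Int × Int × Int) (hr : path.foldl (fun b c => lcPick b c x) best = some r) :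
    ∀ c ∈ path, Ble r c x := by
  induction path generalizing best with
  | nil => simp
  | cons c cs ih =>
    intro d hd
    rw [List.foldl_cons] at hr
    rcases List.mem_cons.1 hd with rfl | hd'
    · have hstep : ∃ b', lcPick best d x = some b' ∧ Ble b' d x := by
        rcases best with _ | b
        · exact ⟨d, rfl, Ble_refl _ _⟩
        · by_cases hb : lcBeats d b x = true
          · exact ⟨d, by simp [lcPick_some, hb], Ble_refl _ _⟩
          · exact ⟨b, by simp [lcPick_some, hb], not_beats_Ble (by simp [hb])⟩
      obtain ⟨b', hb', hble⟩ := hstep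
      rw [hb'] at hr
      exact Ble_trans (foldPick_ge_start cs b' x r hr) hble
    · exact ih (lcPick best c x) hr d hd'

lemma foldPick_some_of_some (path : List (Int × Int × Int)) (b : Int × Int × Int) (x : Int) :
    ∃ r, path.foldl (fun b c => lcPick b c x) (some b) = some r := by
  induction path generalizing b with
  | nil => exact ⟨b, rfl⟩
  | cons c cs ih =>
    rw [List.foldl_cons, lcPick_some]
    split_ifs with hb
    · exact ih c
    · exact ih b

lemma foldPick_some (path : List (Int × Int × Int)) (c : Int × Int × Int) (x : Int)
    (hc : c ∈ path) (best : Option (Int × Int × Int)) :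
    ∃ r, path.foldl (fun b c => lcPick b c x) best = some r := by
  induction path generalizing best with
  | nil => simp at hc
  | cons d ds ih =>
    rw [List.foldl_cons]
    rcases List.mem_cons.1 hc with rfl | hc'
    · have : ∃ b', lcPick best c x = some b' := by
        rcases best with _ | b
        · exact ⟨c, rfl⟩
        · by_cases hb : lcBeats c b x = true
          · exact ⟨c, by simp [lcPick_some, hb]⟩
          · exact ⟨b, by simp [lcPick_some, hb]⟩
      obtain ⟨b', hb'⟩ := this
      rw [hb']
      exact foldPick_some_of_some ds b' x
    · exact ih hc' _

lemma query_top (arr : List Int) (i : Int) (t : LCT)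
    (h0 : 0 ≤ i) (h1 : i ≤ (arr.length : Int) - 2)
    (hl : ∀ l ∈ lcLines t, ∃ j : Int, i + 1 ≤ j ∧ j ≤ (arr.length : Int) - 1 ∧ l = lineOf arr j)
    (hc : ∀ j : Int, i + 1 ≤ j → j ≤ (arr.length : Int) - 1 →
      Covers t 0 ((arr.length : Int) - 2) (lineOf arr j)) :
    ∃ b : Int, lcQuery t 0 ((arr.length : Int) - 2) i none = some (lineOf arr b) ∧
      TopIdx arr i b := by
  obtain ⟨c0, hc01, _⟩ := hc (i + 1) le_rfl (by omega) i h0 h1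
  obtain ⟨r, hr⟩ := foldPick_some _ c0 i hc01 none
  have hq : lcQuery t 0 ((arr.length : Int) - 2) i none = some r := by
    rw [lcQuery_eq_fold]; exact hr
  have hrmem : r ∈ lcPath t 0 ((arr.length : Int) - 2) i := by
    rcases foldPick_mem _ none i r hr with h | h
    · simp at h
    · exact h
  obtain ⟨jr, hj1, hj2, rfl⟩ := hl r (lcPath_subset_lines t _ _ _ hrmem)
  refine ⟨jr, hq, hj1, by omega, ?_⟩
  intro k hk1 hk2
  obtain ⟨ck, hck, hble⟩ := hc k hk1 (by omega) i h0 h1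
  exact Ble_trans (foldPick_ble _ none i _ hr ck hck) hble

-- invariant of the sweep: after all i ≥ k have been processed, the tree holds only lines
-- j ∈ [k+1, n-1], covers all of them, and the accumulated list gives the top index per i
def SweepInv (arr : List Int) (k : Nat) (st : LCT × List Int) : Prop :=
  (∀ l ∈ lcLines st.1, ∃ j : Int, (k : Int) + 1 ≤ j ∧ j ≤ (arr.length : Int) - 1 ∧
      l = lineOf arr j) ∧
  (∀ j : Int, (k : Int) + 1 ≤ j → j ≤ (arr.length : Int) - 1 →
      Covers st.1 0 ((arr.length : Int) - 2) (lineOf arr j)) ∧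
  ((st.2.length : Int) = (arr.length : Int) - 1 - (k : Int)) ∧
  (∀ q : Nat, q < st.2.length → TopIdx arr ((k : Int) + (q : Int)) (st.2.getD q 0))

lemma sweep_step (arr : List Int) (k : Nat) (st : LCT × List Int)
    (hk : (k : Int) ≤ (arr.length : Int) - 2) (h : SweepInv arr (k + 1) st) :
    SweepInv arr k (gbjSweepStep arr st (k : Int)) := by
  obtain ⟨hl, hc, hlen, htops⟩ := h
  have hline : (-(PySem.List.pyGet? arr ((k : Int) + 1)).getD 0,
      (PySem.List.pyGet? arr ((k : Int) + 1)).getD 0 * ((k : Int) + 1), (k : Int) + 1)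
      = lineOf arr ((k : Int) + 1) := rfl
  have hle : (0 : Int) ≤ (arr.length : Int) - 2 := by omega
  refine ⟨?_, ?_, ?_, ?_⟩
  · intro y hy
    rcases List.mem_cons.1 (lcLines_insert st.1 _ _ _ (by simpa [gbjSweepStep, hline] using hy))
        with rfl | hy'
    · exact ⟨(k : Int) + 1, by omega, by omega, rfl⟩
    · obtain ⟨j, hj1, hj2, rfl⟩ := hl _ hy'
      exact ⟨j, by omega, hj2, rfl⟩
  · intro j hj1 hj2
    rcases eq_or_lt_of_le hj1 with rfl | hj1'
    · simpa [gbjSweepStep, hline] using covers_insert_self st.1 0 _ (lineOf arr ((k:Int)+1)) hle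
    · intro x hx1 hx2
      have := covers_insert_point st.1 0 ((arr.length : Int) - 2) x (lineOf arr ((k:Int)+1))
        (lineOf arr j) hle hx1 hx2 (hc j (by omega) hj2 x hx1 hx2)
      simpa [gbjSweepStep, hline] using this
  · simp only [gbjSweepStep, List.length_cons]
    push_cast
    push_cast at hlen
    omega
  · intro q hq
    match q with
    | 0 =>
      obtain ⟨b, hb, htop⟩ := query_top arr (k : Int)
        (lcInsert st.1 0 ((arr.length : Int) - 2) (lineOf arr ((k:Int)+1)))
        (by omega) hk
        (fun y hy => by
          rcases List.mem_cons.1 (lcLines_insert st.1 _ _ _ hy) with rfl | hy'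
          · exact ⟨(k : Int) + 1, by omega, by omega, rfl⟩
          · obtain ⟨j, hj1, hj2, rfl⟩ := hl _ hy'
            exact ⟨j, by omega, hj2, rfl⟩)
        (fun j hj1 hj2 => by
          rcases eq_or_lt_of_le hj1 with rfl | hj1'
          · exact covers_insert_self st.1 0 _ _ hle
          · intro x hx1 hx2
            exact covers_insert_point st.1 0 ((arr.length : Int) - 2) x (lineOf arr ((k:Int)+1))
              (lineOf arr j) hle hx1 hx2 (hc j (by omega) hj2 x hx1 hx2))
      show TopIdx arr ((k : Int) + ((0 : Nat) : Int)) (((gbjSweepStep arr st (k : Int)).2).getD 0 0)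
      have hval : ((gbjSweepStep arr st (k : Int)).2).getD 0 0 = b := by
        simp only [gbjSweepStep, hline, List.getD]
        rw [hb]
        rfl
      rw [hval]
      simpa using htop
    | q + 1 =>
      have hq' : q < st.2.length := by
        simp only [gbjSweepStep, List.length_cons] at hq; omega
      have := htops q hq'
      have hval : ((gbjSweepStep arr st (k : Int)).2).getD (q + 1) 0 = st.2.getD q 0 := by
        simp [gbjSweepStep]
      rw [hval]
      have hcast : ((k : Int)) + ((q + 1 : Nat) : Int) = (((k + 1 : Nat)) : Int) + (q : Int) := by
        push_cast; ring
      rw [hcast]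
      exact this

lemma sweep_descend (arr : List Int) : ∀ (k : Nat), (k : Int) ≤ (arr.length : Int) - 1 →
    ∀ st, SweepInv arr k st →
      SweepInv arr 0
        (List.foldl (gbjSweepStep arr) st (PySem.List.pyRange ((k : Int) - 1) (-1) (-1))) := by
  intro k
  induction k with
  | zero =>
    intro _ st hst
    rw [show ((0 : Nat) : Int) - 1 = (-1 : Int) by norm_num,
      PySem.List.pyRange_neg_one_eq_nil le_rfl]
    exact hst
  | succ k ih =>
    intro hk st hst
    have h1 : ((k + 1 : Nat) : Int) - 1 = (k : Int) := by push_cast; ring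
    rw [h1, PySem.List.pyRange_neg_one_cons (by omega), List.foldl_cons]
    exact ih (by push_cast at hk ⊢; omega) _ (sweep_step arr k st (by push_cast at hk; omega) hst)

lemma gbjSweep_top (arr : List Int) (i : Int) (h0 : 0 ≤ i) (h1 : i < (arr.length : Int) - 1) :
    ((gbjSweep arr).length : Int) = (arr.length : Int) - 1 ∧
    TopIdx arr i ((PySem.List.pyGet? (gbjSweep arr) i).getD 0) := by
  have hn2 : 2 ≤ arr.length := by omega
  have hbase : SweepInv arr (arr.length - 1) (LCT.leaf, []) := by
    refine ⟨by simp [lcLines], ?_, by simp; omega, by simp⟩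
    intro j hj1 hj2
    have : ((arr.length - 1 : Nat) : Int) = (arr.length : Int) - 1 := by omega
    rw [this] at hj1
    omega
  have hfin := sweep_descend arr (arr.length - 1) (by omega) _ hbase
  have hrange : ((arr.length - 1 : Nat) : Int) - 1 = (arr.length : Int) - 2 := by omega
  rw [hrange] at hfin
  obtain ⟨_, _, hlen, htops⟩ := hfin
  have hsw : gbjSweep arr
      = (List.foldl (gbjSweepStep arr) (LCT.leaf, [])
          (PySem.List.pyRange ((arr.length : Int) - 2) (-1) (-1))).2 := rfl
  constructor
  · rw [hsw]; simpa using hlen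
  · have hlt : i.toNat < (gbjSweep arr).length := by
      rw [hsw]; omega
    have hget : (PySem.List.pyGet? (gbjSweep arr) i).getD 0 = (gbjSweep arr).getD i.toNat 0 := by
      rw [PySem.List.pyGet?_of_nonneg _ h0]
      exact List.getD_eq_getElem?_getD.symm
    rw [hget]
    have := htops i.toNat (by rw [hsw] at hlt; exact hlt)
    rw [hsw]
    have hcast : ((0 : Nat) : Int) + ((i.toNat : Nat) : Int) = i := by omega
    rwa [hcast] at this

lemma walk_eq_loop (arr : List Int) (fuel : Nat) (i score : Int) (path : List Int)
    (h0 : 0 ≤ i) :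
    gbjLoopA arr fuel i score path = gbjWalk arr (gbjSweep arr) fuel i score path := by
  induction fuel generalizing i score path with
  | zero => rfl
  | succ fuel ih =>
    simp only [gbjLoopA, gbjWalk]
    by_cases h : i < (arr.length : Int) - 1
    · rw [if_pos h, if_pos h]
      obtain ⟨hinner, htopA⟩ := gbjInner_top arr i h
      obtain ⟨hlen, htopB⟩ := gbjSweep_top arr i h0 h
      have hj : (PySem.List.pyGet? (gbjSweep arr) i).getD 0 = (gbjInner arr i).2 :=
        TopIdx_unique htopB htopA
      have h1 : (gbjInner arr i).1.getD 0
          = (PySem.List.pyGet? arr ((gbjInner arr i).2)).getD 0 * ((gbjInner arr i).2 - i) := by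
        conv_lhs => rw [hinner]
        rfl
      rw [hj, h1]

      exact ih (gbjInner arr i).2 _ _ (by have := htopA.1; omega)
    · rw [if_neg h, if_neg h]

-- ===== VERDICT (by name: the statement is the Claim_ definition above) =====
theorem greedy_best_jump_spec : Claim_equal_greedy_best_jump := by
  intro arr _
  show greedy_best_jump arr = greedy_best_jump_alt arr
  unfold greedy_best_jump greedy_best_jump_alt
  by_cases h : arr.length ≤ 1
  · rw [if_pos h]
    have hn : ¬ ((0:Int) < (arr.length : Int) - 1) := by
      have : (arr.length : Int) ≤ 1 := by exact_mod_cast h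
      omega
    show gbjLoopA arr (arr.length + 1) 0 0 [0] = (0, [0])
    rw [gbjLoopA, if_neg hn]
  · rw [if_neg h]
    exact walk_eq_loop arr (arr.length + 1) 0 0 [0] le_rfl
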